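-- pv_equiv track=rewrite | github.com/Racemuis/TIGER | utils/util_test.py | pad_ensure_division
-- ===== SOURCE A (Python) =====
-- def pad_ensure_division(h, w, division):
--
--     def compute_pad(s, d):
--         if s % d != 0:
--             p = 0
--             while True:
--                 if (s + p) % d == 0:
--                     return p
--                 p += 1
--         return 0
--
--     py = compute_pad(h, division)
--     px = compute_pad(w, division)
--     padding = (py//2, py-py//2), (px//2, px-px//2)
--     return padding
-- ===== SOURCE B (Python) =====
-- def pad_ensure_division(h, w, division):
--     d = abs(division)
--     py = (-h) % d
--     px = (-w) % d
--     return (py // 2, py - py // 2), (px // 2, px - px // 2)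
-- ===== Notes on version B (the rewrite author's own statement) =====
-- stated objective: faster
-- what changed: replaces the incrementing while-loop search for the padding with the closed-form modular expression (-s) % abs(d)
import Mathlib
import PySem

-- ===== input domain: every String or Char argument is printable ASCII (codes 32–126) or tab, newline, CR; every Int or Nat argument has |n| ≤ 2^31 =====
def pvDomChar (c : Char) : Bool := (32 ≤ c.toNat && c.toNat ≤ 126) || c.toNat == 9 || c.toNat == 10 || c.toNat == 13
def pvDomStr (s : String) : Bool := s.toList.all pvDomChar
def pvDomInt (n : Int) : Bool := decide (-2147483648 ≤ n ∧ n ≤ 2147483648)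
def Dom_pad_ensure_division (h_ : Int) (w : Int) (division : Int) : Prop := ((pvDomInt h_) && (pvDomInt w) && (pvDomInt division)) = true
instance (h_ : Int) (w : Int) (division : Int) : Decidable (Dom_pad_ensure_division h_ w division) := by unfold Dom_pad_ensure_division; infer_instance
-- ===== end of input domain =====

-- ===== PORT A =====
-- Header: B computes each pad in closed form ((-s) % abs(d)) instead of A's incrementing
-- while-loop search; objective: faster (O(1) per pad instead of O(|division|)).

-- the 'while True: … p += 1' loop of compute_pad; fuel = |d| merely makes it total
-- (for d ≠ 0 the loop returns within |d| iterations; d = 0 is excluded by Pre_)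
def padLoopA (s d : Int) (p : Int) : Nat → Int
  | 0 => p
  | fuel + 1 => if PySem.Int.mod (s + p) d = 0 then p else padLoopA s d (p + 1) fuel

def compute_padA (s d : Int) : Int :=
  if PySem.Int.mod s d ≠ 0 then padLoopA s d 0 d.natAbs else 0

def pad_ensure_division (h_ : Int) (w : Int) (division : Int) : List (List Int) :=
  let py := compute_padA h_ division
  let px := compute_padA w division
  [[PySem.Int.floordiv py 2, py - PySem.Int.floordiv py 2],
   [PySem.Int.floordiv px 2, px - PySem.Int.floordiv px 2]]

-- ===== PORT B =====
def compute_padB (s d : Int) : Int := PySem.Int.mod (-s) (Int.natAbs d)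

def pad_ensure_division_alt (h_ : Int) (w : Int) (division : Int) : List (List Int) :=
  let py := compute_padB h_ division
  let px := compute_padB w division
  [[PySem.Int.floordiv py 2, py - PySem.Int.floordiv py 2],
   [PySem.Int.floordiv px 2, px - PySem.Int.floordiv px 2]]

-- ===== PRECONDITION & SPEC =====
-- Pre_ excludes division = 0, on which Python A raises ZeroDivisionError (s % 0)
def Pre_pad_ensure_division (h_ : Int) (w : Int) (division : Int) : Prop := division ≠ 0
instance (h_ : Int) (w : Int) (division : Int) : Decidable (Pre_pad_ensure_division h_ w division) := by unfold Pre_pad_ensure_division; infer_instance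
def pvWitness_pad_ensure_division : Int × Int × Int := (5, 7, 3)

def Spec_pad_ensure_division (h_ : Int) (w : Int) (division : Int) (out : List (List Int)) : Prop := out = pad_ensure_division_alt h_ w division
instance (h_ : Int) (w : Int) (division : Int) (out : List (List Int)) : Decidable (Spec_pad_ensure_division h_ w division out) := by unfold Spec_pad_ensure_division; infer_instance

-- ===== CLAIM (what is proved, stated in full; the proofs are below) =====
def Claim_equal_pad_ensure_division : Prop := ∀ (h_ : Int) (w : Int) (division : Int), Dom_pad_ensure_division h_ w division → Pre_pad_ensure_division h_ w division → Spec_pad_ensure_division h_ w division (pad_ensure_division h_ w division)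

-- ===== LEMMAS AND PROOFS =====
lemma padLoopA_eq (s d t : Int) (_hd : d ≠ 0) (_ht0 : 0 ≤ t)
    (htd : ((d.natAbs : Int)) ∣ (s + t)) (htlt : t < (d.natAbs : Int)) :
    ∀ fuel (p : Int), 0 ≤ p → p ≤ t → (t - p).toNat < fuel → padLoopA s d p fuel = t := by
  intro fuel
  induction fuel with
  | zero => intro p _ _ hlt; omega
  | succ n ih =>
    intro p hp0 hpt hlt
    simp only [padLoopA]
    by_cases hz : PySem.Int.mod (s + p) d = 0
    · simp only [hz, if_true]
      -- d ∣ s+p and D ∣ s+t ⇒ D ∣ t-p with 0 ≤ t-p < D ⇒ t = p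
      have hdvd : ((d.natAbs : Int)) ∣ (s + p) := by
        have := (PySem.Int.mod_eq_zero_iff_dvd (s + p) d).mp hz
        exact (Int.natAbs_dvd).mpr this
      have hdiff : ((d.natAbs : Int)) ∣ (t - p) := by
        have := dvd_sub htd hdvd
        simpa using this
      rcases eq_or_lt_of_le hpt with h | h
      · omega
      · exfalso
        have : (d.natAbs : Int) ≤ t - p := Int.le_of_dvd (by omega) hdiff
        omega
    · simp only [hz, if_false]
      have hpt' : p < t := by
        rcases eq_or_lt_of_le hpt with h | h
        · exfalso; apply hz
          rw [h]
          exact (PySem.Int.mod_eq_zero_iff_dvd (s + t) d).mpr ((Int.natAbs_dvd).mp htd)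
        · exact h
      exact ih (p + 1) (by omega) (by omega) (by omega)

lemma compute_pad_eq (s d : Int) (hd : d ≠ 0) : compute_padA s d = compute_padB s d := by
  have hD : (0 : Int) < (d.natAbs : Int) := by
    have := Int.natAbs_pos.mpr hd; exact_mod_cast this
  set D : Int := (d.natAbs : Int) with hDdef
  set t : Int := PySem.Int.mod (-s) D with htdef
  have ht0 : 0 ≤ t := PySem.Int.mod_nonneg (-s) hD
  have htlt : t < D := PySem.Int.mod_lt (-s) hD
  have htd : D ∣ (s + t) := by
    have hfm := PySem.Int.floordiv_mul_add_mod (-s) D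
    -- floordiv (-s) D * D + t = -s  ⇒  s + t = -(floordiv (-s) D) * D
    refine ⟨-(PySem.Int.floordiv (-s) D), ?_⟩
    rw [htdef]
    nlinarith [hfm]
  unfold compute_padA compute_padB
  by_cases hz : PySem.Int.mod s d = 0
  · simp only [hz, ne_eq, not_true_eq_false, if_false]
    -- d ∣ s ⇒ D ∣ -s ⇒ mod (-s) D = 0
    have hdvd : D ∣ (-s) := by
      have := (PySem.Int.mod_eq_zero_iff_dvd s d).mp hz
      exact dvd_neg.mpr ((Int.natAbs_dvd).mpr this)
    exact ((PySem.Int.mod_eq_zero_iff_dvd (-s) D).mpr hdvd).symm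
  · simp only [hz, ne_eq, not_false_eq_true, if_true]
    exact padLoopA_eq s d t hd ht0 htd htlt d.natAbs 0 le_rfl ht0 (by omega)

-- ===== VERDICT (by name: the statement is the Claim_ definition above) =====
theorem pad_ensure_division_spec : Claim_equal_pad_ensure_division := by
  intro h_ w division _ hpre
  unfold Spec_pad_ensure_division pad_ensure_division pad_ensure_division_alt
  rw [compute_pad_eq h_ division hpre, compute_pad_eq w division hpre]
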